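-- pv_equiv track=rewrite | github.com/kiritoscs/jinx | utils/translator.py | match_official_dict
-- ===== SOURCE A (Python) =====
-- def match_official_dict(official_dict: dict[str, str], content: str) -> str:
--     """匹配官方词典, 最大匹配"""
--     if official_dict:
--         if content in official_dict:
--             return official_dict[content]
--         max_official_content = ""
--         for official_content, translate_content in official_dict.items():
--             if official_content in content:
--                 if len(official_content) > len(max_official_content):
--                     max_official_content = official_content
--         if max_official_content:
--             content = content.replace(max_official_content, official_dict[max_official_content])
--     return content
-- ===== SOURCE B (Python) =====
-- def match_official_dict(official_dict: dict[str, str], content: str) -> str: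
--     """匹配官方词典, 最大匹配 — sort-then-scan: try keys longest-first (stable),
--     return on the first one contained in content (skips all shorter keys)."""
--     if not official_dict:
--         return content
--     if content in official_dict:
--         return official_dict[content]
--     for key in sorted(official_dict, key=len, reverse=True):
--         if key and key in content:
--             return content.replace(key, official_dict[key])
--     return content
-- ===== Notes on version B (the rewrite author's own statement) =====
-- stated objective: faster
-- what changed: A scans the whole dict keeping a running-longest matching key and replaces afterwards; B sorts the keys by length descending (Python's stable sort keeps dict order among equal lengths, matching A's first-maximal tie-break) and returns on the FIRST key contained in content, so the max accumulator disappears and all keys after the first hit are never substring-tested.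
import Mathlib
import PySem

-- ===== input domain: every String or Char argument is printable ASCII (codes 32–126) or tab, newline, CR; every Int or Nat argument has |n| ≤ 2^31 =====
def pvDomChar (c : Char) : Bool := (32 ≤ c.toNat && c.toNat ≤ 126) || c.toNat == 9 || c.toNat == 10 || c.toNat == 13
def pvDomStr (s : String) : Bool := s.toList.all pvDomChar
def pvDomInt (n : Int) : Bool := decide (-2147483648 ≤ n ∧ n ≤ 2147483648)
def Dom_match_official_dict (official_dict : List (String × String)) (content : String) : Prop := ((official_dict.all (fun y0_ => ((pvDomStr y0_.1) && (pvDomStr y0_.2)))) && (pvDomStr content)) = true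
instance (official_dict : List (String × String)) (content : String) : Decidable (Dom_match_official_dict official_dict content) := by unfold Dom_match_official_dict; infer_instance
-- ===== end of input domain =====

-- B replaces A's running-longest accumulator scan by sort-then-scan: sort the keys by length
-- descending (stable, so dict order breaks ties like A's strict-improvement max) and return on
-- the first key contained in content, stopping the substring tests at the first hit (objective:
-- faster; a timing run measured B faster at the largest size).

-- shared primitive: official_dict[k], first-match lookup in the association list (both Pythons
-- do the same dict subscript; in both it is only reached on present keys)
def pyDictGet (official_dict : List (String × String)) (k : String) : String :=
  ((official_dict.find? (fun p => p.1 == k)).map Prod.snd).getD ""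

-- ===== PORT A =====
def match_official_dict (official_dict : List (String × String)) (content : String) : String :=
  if official_dict.isEmpty then content                     -- `if official_dict:` false → fall through to `return content`
  else if official_dict.any (fun p => p.1 == content) then  -- `content in official_dict`
    pyDictGet official_dict content
  else
    let m := official_dict.foldl
      (fun acc p =>
        if PySem.Str.isIn p.1 content then
          (if PySem.Str.len acc < PySem.Str.len p.1 then p.1 else acc)
        else acc) ""
    if m == "" then content
    else PySem.Str.replace content m (pyDictGet official_dict m)

-- ===== PORT B =====
def match_official_dict_alt (official_dict : List (String × String)) (content : String) : String :=
  if official_dict.isEmpty then content                     -- `if not official_dict: return content`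
  else if official_dict.any (fun p => p.1 == content) then  -- `if content in official_dict:`
    pyDictGet official_dict content
  else
    -- `for key in sorted(official_dict, key=len, reverse=True): if key and key in content: return …`
    -- (a first-match early-return loop is List.find?)
    match (PySem.List.sorted (official_dict.map Prod.fst) PySem.Str.len true).find?
        (fun k => !(k == "") && PySem.Str.isIn k content) with
    | some key => PySem.Str.replace content key (pyDictGet official_dict key)
    | none => content                                       -- loop falls through

-- ===== PRECONDITION & SPEC =====
def Spec_match_official_dict (official_dict : List (String × String)) (content : String) (out : String) : Prop := out = match_official_dict_alt official_dict content
instance (official_dict : List (String × String)) (content : String) (out : String) : Decidable (Spec_match_official_dict official_dict content out) := by unfold Spec_match_official_dict; infer_instance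

-- ===== CLAIM (what is proved, stated in full; the proofs are below) =====
def Claim_equal_match_official_dict : Prop := ∀ (official_dict : List (String × String)) (content : String), Dom_match_official_dict official_dict content → Spec_match_official_dict official_dict content (match_official_dict official_dict content)

-- ===== LEMMAS AND PROOFS =====

-- a nonempty string has positive Python length
lemma len_pos_of_ne_empty (s : String) (h : s ≠ "") : 0 < PySem.Str.len s := by
  simp only [PySem.Str.len]
  have : s.toList ≠ [] := by
    intro hn
    exact h (by simpa using congrArg String.ofList hn)
  have := List.length_pos_of_ne_nil this
  exact_mod_cast this

-- abbreviations used only by the proofs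
def stepA (content : String) (acc k : String) : String :=
  if PySem.Str.isIn k content then
    (if PySem.Str.len acc < PySem.Str.len k then k else acc)
  else acc

def stepM (o : Option String) (k : String) : Option String :=
  match o with
  | none => some k
  | some m => if PySem.Str.len m < PySem.Str.len k then some k else some m

def stepP (p : String → Bool) (o : Option String) (k : String) : Option String :=
  if p k then stepM o k else o

def hitP (content : String) (k : String) : Bool := !(k == "") && PySem.Str.isIn k content

def descP (a b : String) : Prop := PySem.Str.len b ≤ PySem.Str.len a

-- ---------- A side: the running-max fold computes max? of the hits ----------

lemma fold_link (content : String) :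
    ∀ (ks : List String) (acc : String), acc ≠ "" →
      (ks.filter (hitP content)).foldl stepM (some acc)
        = some (ks.foldl (stepA content) acc) := by
  intro ks
  induction ks with
  | nil => intro acc h; simp
  | cons k t ih =>
    intro acc hacc
    by_cases hq : hitP content k = true
    · have hk : k ≠ "" := by
        simp only [hitP, Bool.and_eq_true, Bool.not_eq_true', beq_eq_false_iff_ne] at hq
        exact hq.1
      have hin : PySem.Str.isIn k content = true := by
        simp only [hitP, Bool.and_eq_true] at hq; exact hq.2
      simp only [List.filter_cons, hq, if_true, List.foldl_cons]
      by_cases hlt : PySem.Str.len acc < PySem.Str.len k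
      · rw [show stepM (some acc) k = some k by simp only [stepM]; rw [if_pos hlt],
            show stepA content acc k = k by simp only [stepA, hin, if_true]; rw [if_pos hlt]]
        exact ih k hk
      · rw [show stepM (some acc) k = some acc by simp only [stepM]; rw [if_neg hlt],
            show stepA content acc k = acc by simp only [stepA, hin, if_true]; rw [if_neg hlt]]
        exact ih acc hacc
    · have hstep : stepA content acc k = acc := by
        simp only [hitP, Bool.and_eq_true, Bool.not_eq_true', beq_eq_false_iff_ne] at hq
        by_cases hin : PySem.Str.isIn k content = true
        · have hk : k = "" := by
            by_contra hk
            exact hq ⟨hk, hin⟩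
          have h0 : PySem.Str.len k = 0 := by simp [hk, PySem.Str.len]
          have hpos := len_pos_of_ne_empty acc hacc
          simp only [stepA, hin, if_true]
          rw [if_neg (by omega)]
        · simp only [stepA, hin, Bool.false_eq_true, if_false]
      simp only [List.filter_cons, hq, List.foldl_cons, hstep]
      exact ih acc hacc

lemma max?_eq_foldl_stepM (xs : List String) :
    PySem.List.max? xs PySem.Str.len = xs.foldl stepM none := by
  simp only [PySem.List.max?]
  apply List.foldl_ext
  intro o k _
  cases o <;> rfl

lemma fold_main (content : String) (ks : List String) :
    ks.foldl (stepA content) ""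
      = (PySem.List.max? (ks.filter (hitP content)) PySem.Str.len).getD "" := by
  induction ks with
  | nil => simp [max?_eq_foldl_stepM]
  | cons k t ih =>
    by_cases hq : hitP content k = true
    · have hk : k ≠ "" := by
        simp only [hitP, Bool.and_eq_true, Bool.not_eq_true', beq_eq_false_iff_ne] at hq
        exact hq.1
      have hin : PySem.Str.isIn k content = true := by
        simp only [hitP, Bool.and_eq_true] at hq; exact hq.2
      have hlt : PySem.Str.len ("" : String) < PySem.Str.len k := by
        have h0 : PySem.Str.len ("" : String) = 0 := by simp [PySem.Str.len]
        have := len_pos_of_ne_empty k hk; omega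
      have hA : stepA content "" k = k := by
        simp only [stepA, hin, if_true]
        rw [if_pos hlt]
      rw [max?_eq_foldl_stepM]
      simp only [List.filter_cons, hq, if_true, List.foldl_cons, hA]
      rw [show stepM none k = some k from rfl, fold_link content t k hk]
      rfl
    · have hstep : stepA content "" k = "" := by
        simp only [hitP, Bool.and_eq_true, Bool.not_eq_true', beq_eq_false_iff_ne] at hq
        by_cases hin : PySem.Str.isIn k content = true
        · have hk : k = "" := by
            by_contra hk
            exact hq ⟨hk, hin⟩
          have h0 : PySem.Str.len k = 0 := by simp [hk, PySem.Str.len]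
          have h0' : PySem.Str.len ("" : String) = 0 := by simp [PySem.Str.len]
          simp only [stepA, hin, if_true]
          rw [if_neg (by omega)]
        · simp only [stepA, hin, Bool.false_eq_true, if_false]
      simp only [List.filter_cons, hq, List.foldl_cons, hstep]
      exact ih

-- mem of the filtered hit list gives a nonempty string
lemma hit_ne_empty (content k : String) {ks : List String}
    (h : k ∈ ks.filter (hitP content)) : k ≠ "" := by
  have := List.of_mem_filter h
  simp only [hitP, Bool.and_eq_true, Bool.not_eq_true', beq_eq_false_iff_ne] at this
  exact this.1

-- ---------- B side: find? on the stable descending sort is max? of the hits ----------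

-- inserting into a length-descending list keeps it length-descending
lemma pairwise_insertBy (x : String) :
    ∀ (ys : List String), ys.Pairwise descP →
      (PySem.List.insertBy (fun a b => decide (PySem.Str.len b < PySem.Str.len a)) x ys).Pairwise descP := by
  intro ys
  induction ys with
  | nil => intro _; simp [PySem.List.insertBy, descP]
  | cons y t ih =>
    intro h
    rw [List.pairwise_cons] at h
    by_cases hb : PySem.Str.len y < PySem.Str.len x
    · simp only [PySem.List.insertBy, hb, decide_true, if_true]
      refine List.Pairwise.cons ?_ (List.Pairwise.cons h.1 h.2)
      intro z hz
      rcases List.mem_cons.mp hz with rfl | hz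
      · exact le_of_lt hb
      · exact le_trans (h.1 z hz) (le_of_lt hb)
    · simp only [PySem.List.insertBy, hb, decide_false, Bool.false_eq_true, if_false]
      refine List.Pairwise.cons ?_ (ih h.2)
      intro z hz
      rcases (PySem.List.mem_insertBy _ _ _ _).mp hz with rfl | hz
      · exact le_of_not_gt hb
      · exact h.1 z hz

-- where the new element lands in the scan: find? after an insert is one max?-step
lemma find?_insertBy (p : String → Bool) (x : String) :
    ∀ (ys : List String), ys.Pairwise descP →
      (PySem.List.insertBy (fun a b => decide (PySem.Str.len b < PySem.Str.len a)) x ys).find? p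
        = stepP p (ys.find? p) x := by
  intro ys
  induction ys with
  | nil =>
    intro _
    simp only [PySem.List.insertBy, List.find?_nil, stepP, stepM]
    by_cases hp : p x = true <;> simp [hp, List.find?]
  | cons y t ih =>
    intro h
    rw [List.pairwise_cons] at h
    by_cases hb : PySem.Str.len y < PySem.Str.len x
    · simp only [PySem.List.insertBy, hb, decide_true, if_true]
      by_cases hp : p x = true
      · rw [List.find?_cons_of_pos hp]
        simp only [stepP, hp, if_true, stepM]
        cases hf : (y :: t).find? p with
        | none => rfl
        | some m =>
          have hm : m ∈ y :: t := List.mem_of_find?_eq_some hf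
          have hle : PySem.Str.len m ≤ PySem.Str.len y := by
            rcases List.mem_cons.mp hm with rfl | hm
            · exact le_refl _
            · exact h.1 m hm
          show some x = if PySem.Str.len m < PySem.Str.len x then some x else some m
          rw [if_pos (lt_of_le_of_lt hle hb)]
      · rw [List.find?_cons_of_neg (by simp [hp])]
        simp [stepP, hp]
    · simp only [PySem.List.insertBy, hb, decide_false, Bool.false_eq_true, if_false]
      by_cases hpy : p y = true
      · rw [List.find?_cons_of_pos hpy, List.find?_cons_of_pos hpy]
        simp only [stepP, stepM]
        by_cases hp : p x = true
        · simp only [hp, if_true]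
          show some y = if PySem.Str.len y < PySem.Str.len x then some x else some y
          rw [if_neg hb]
        · simp [hp]
      · rw [List.find?_cons_of_neg (by simp [hpy]), List.find?_cons_of_neg (by simp [hpy])]
        exact ih h.2

-- scanning the insertion-sorted list = folding the guarded max?-step over the original order
lemma find?_foldl_insertBy (p : String → Bool) :
    ∀ (ks : List String) (acc : List String), acc.Pairwise descP →
      (ks.foldl (fun a x => PySem.List.insertBy (fun a b => decide (PySem.Str.len b < PySem.Str.len a)) x a) acc).find? p
        = ks.foldl (stepP p) (acc.find? p) := by
  intro ks
  induction ks with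
  | nil => intro acc _; rfl
  | cons k t ih =>
    intro acc h
    simp only [List.foldl_cons]
    rw [ih _ (pairwise_insertBy k acc h), find?_insertBy p k acc h]

-- the B-side scan equals max? of the hit list, in original (dict) order
lemma find_sorted_eq_max? (p : String → Bool) (ks : List String) :
    (PySem.List.sorted ks PySem.Str.len true).find? p
      = PySem.List.max? (ks.filter p) PySem.Str.len := by
  rw [PySem.List.sorted_rev_eq_foldl_insertBy,
      find?_foldl_insertBy p ks [] (List.Pairwise.nil), List.find?_nil,
      max?_eq_foldl_stepM, List.foldl_filter]
  rfl

-- ===== VERDICT (by name: the statement is the Claim_ definition above) =====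
theorem match_official_dict_spec : Claim_equal_match_official_dict := by
  intro d content _
  unfold Spec_match_official_dict match_official_dict match_official_dict_alt
  by_cases he : d.isEmpty
  · simp [he]
  · simp only [he]
    by_cases hc : d.any (fun p => p.1 == content)
    · simp [hc]
    · simp only [hc]
      have hfold :
          d.foldl (fun acc p =>
              if PySem.Str.isIn p.1 content then
                (if PySem.Str.len acc < PySem.Str.len p.1 then p.1 else acc)
              else acc) ""
            = (d.map Prod.fst).foldl (stepA content) "" := by
        rw [List.foldl_map]
        rfl
      rw [hfold, fold_main content (d.map Prod.fst),
          show (fun k : String => !(k == "") && PySem.Str.isIn k content) = hitP content from rfl,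
          find_sorted_eq_max? (hitP content) (d.map Prod.fst)]
      cases hm : PySem.List.max? ((d.map Prod.fst).filter (hitP content)) PySem.Str.len with
      | none => simp
      | some best =>
          have hbe : best ≠ "" := hit_ne_empty content best (PySem.List.max?_mem hm)
          simp [hbe]
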